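-- pv_equiv track=rewrite | github.com/lore-lml/Data_Science_Lab1 | script3.py | count_black_pixels
-- ===== SOURCE A (Python) =====
-- VECTOR_LENGTH = 784
--
-- BLACK_TH = 128
--
-- def count_black_pixels(zeroes, ones):
--     Z = [0] * VECTOR_LENGTH
--     O = [0] * VECTOR_LENGTH
--
--     for z, o in zip(zeroes, ones):
--         for i in range(0, VECTOR_LENGTH):
--             if z[i] >= BLACK_TH:
--                 Z[i] += 1
--             if o[i] >= BLACK_TH:
--                 O[i] += 1
--
--     return Z, O
-- ===== SOURCE B (Python) =====
-- VECTOR_LENGTH = 784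
--
-- BLACK_TH = 128
--
-- def count_black_pixels(zeroes, ones):
--     # Column-major: for each pixel position, count qualifying images directly.
--     Z = [sum(1 for z, o in zip(zeroes, ones) if z[i] >= BLACK_TH)
--          for i in range(VECTOR_LENGTH)]
--     O = [sum(1 for z, o in zip(zeroes, ones) if o[i] >= BLACK_TH)
--          for i in range(VECTOR_LENGTH)]
--     return Z, O
-- ===== Notes on version B (the rewrite author's own statement) =====
-- stated objective: alternative
-- what changed: Inverts the loop nesting: instead of streaming over image pairs and incrementing two mutable 784-slot accumulators, B builds each output column-major, computing every position's count as an independent reduction over the zipped image pairs.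
import Mathlib
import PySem

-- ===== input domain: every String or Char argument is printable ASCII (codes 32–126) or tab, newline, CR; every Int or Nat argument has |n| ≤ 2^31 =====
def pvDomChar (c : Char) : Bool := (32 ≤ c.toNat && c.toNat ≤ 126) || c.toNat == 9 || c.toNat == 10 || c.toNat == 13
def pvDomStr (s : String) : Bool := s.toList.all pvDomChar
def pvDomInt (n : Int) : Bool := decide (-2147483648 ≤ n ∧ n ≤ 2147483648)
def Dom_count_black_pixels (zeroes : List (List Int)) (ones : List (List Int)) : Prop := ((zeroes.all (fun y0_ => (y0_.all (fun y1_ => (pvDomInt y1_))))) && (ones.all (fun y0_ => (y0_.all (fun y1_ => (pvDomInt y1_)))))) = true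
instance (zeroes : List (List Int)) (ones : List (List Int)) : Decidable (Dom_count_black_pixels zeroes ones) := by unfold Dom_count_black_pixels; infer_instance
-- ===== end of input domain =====

-- B inverts the loop nesting: position-outer column reductions instead of streaming per-image accumulators (alternative decomposition, same cost).

set_option maxRecDepth 20000


-- ===== PORT A =====
-- inner 'for i in range(0, VECTOR_LENGTH)' loop: two in-place updates per index; Python lists are
-- arrays, so z[i]/o[i]/Z[i]/O[i] are O(1) array accesses (exact under Pre_: indices from range(784)
-- are nonnegative and in range; Python raises on shorter rows, excluded by Pre_)
def cbpInner (z o : List Int) (st : List Int × List Int) : List Int × List Int :=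
  let za := z.toArray
  let oa := o.toArray
  let r := (PySem.List.pyRange 0 784 1).foldl
    (fun (st : Array Int × Array Int) i =>
      ((if 128 ≤ za.getD i.toNat 0 then st.1.setIfInBounds i.toNat (st.1.getD i.toNat 0 + 1) else st.1),
       (if 128 ≤ oa.getD i.toNat 0 then st.2.setIfInBounds i.toNat (st.2.getD i.toNat 0 + 1) else st.2)))
    (st.1.toArray, st.2.toArray)
  (r.1.toList, r.2.toList)

def count_black_pixels (zeroes : List (List Int)) (ones : List (List Int)) : List Int × List Int :=
  (zeroes.zip ones).foldl (fun st p => cbpInner p.1 p.2 st)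
    (List.replicate 784 0, List.replicate 784 0)

-- ===== PORT B =====
-- each column is an independent count over the zipped pairs ('sum(1 for ... if ...)' = countP);
-- rows as arrays: Python's z[i]/o[i] is an O(1) array access (exact for these in-range indices under Pre_)
def count_black_pixels_alt (zeroes : List (List Int)) (ones : List (List Int)) : List Int × List Int :=
  ((PySem.List.pyRange 0 784 1).map (fun i =>
      ((((zeroes.zip ones).map (fun p => (p.1.toArray, p.2.toArray))).countP
          (fun p => decide (128 ≤ p.1.getD i.toNat 0)) : Nat) : Int)),
   (PySem.List.pyRange 0 784 1).map (fun i =>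
      ((((zeroes.zip ones).map (fun p => (p.1.toArray, p.2.toArray))).countP
          (fun p => decide (128 ≤ p.2.getD i.toNat 0)) : Nat) : Int)))

-- ===== PRECONDITION & SPEC =====
-- Pre_ excludes exactly the inputs where Python A raises IndexError (a zipped pair with a row
-- shorter than 784); B raises there too.
def Pre_count_black_pixels (zeroes : List (List Int)) (ones : List (List Int)) : Prop :=
  ∀ p ∈ zeroes.zip ones, 784 ≤ p.1.length ∧ 784 ≤ p.2.length
instance (zeroes : List (List Int)) (ones : List (List Int)) : Decidable (Pre_count_black_pixels zeroes ones) := by unfold Pre_count_black_pixels; infer_instance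

def pvWitness_count_black_pixels : List (List Int) × List (List Int) :=
  ([], [])

def Spec_count_black_pixels (zeroes : List (List Int)) (ones : List (List Int)) (out : List Int × List Int) : Prop := out = count_black_pixels_alt zeroes ones
instance (zeroes : List (List Int)) (ones : List (List Int)) (out : List Int × List Int) : Decidable (Spec_count_black_pixels zeroes ones out) := by unfold Spec_count_black_pixels; infer_instance

-- ===== CLAIM (what is proved, stated in full; the proofs are below) =====
def Claim_equal_count_black_pixels : Prop := ∀ (zeroes : List (List Int)) (ones : List (List Int)), Dom_count_black_pixels zeroes ones → Pre_count_black_pixels zeroes ones → Spec_count_black_pixels zeroes ones (count_black_pixels zeroes ones)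

-- ===== LEMMAS AND PROOFS =====

theorem toArray_getD {α : Type} (l : List α) (n : Nat) (d : α) : l.toArray.getD n d = l.getD n d := by
  unfold Array.getD
  split <;> rename_i h <;> simp at h <;> rw [List.getD_eq_getElem?_getD]
  · simp [List.getElem?_eq_getElem h]
  · simp [List.getElem?_eq_none (by omega)]

-- the array-state inner fold simulates the list-state inner fold
theorem cbp_fold_commute (z o : List Int) (idxs : List Int) (h : ∀ i ∈ idxs, 0 ≤ i) (Z O : List Int) :
    idxs.foldl
      (fun (st : Array Int × Array Int) i =>
        ((if 128 ≤ z.toArray.getD i.toNat 0 then st.1.setIfInBounds i.toNat (st.1.getD i.toNat 0 + 1) else st.1),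
         (if 128 ≤ o.toArray.getD i.toNat 0 then st.2.setIfInBounds i.toNat (st.2.getD i.toNat 0 + 1) else st.2)))
      (Z.toArray, O.toArray)
    = ((idxs.foldl
          (fun (st : List Int × List Int) i =>
            ((if 128 ≤ PySem.List.pyGetD z i 0 then PySem.List.pySetD st.1 i (PySem.List.pyGetD st.1 i 0 + 1) else st.1),
             (if 128 ≤ PySem.List.pyGetD o i 0 then PySem.List.pySetD st.2 i (PySem.List.pyGetD st.2 i 0 + 1) else st.2)))
          (Z, O)).1.toArray,
       (idxs.foldl
          (fun (st : List Int × List Int) i =>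
            ((if 128 ≤ PySem.List.pyGetD z i 0 then PySem.List.pySetD st.1 i (PySem.List.pyGetD st.1 i 0 + 1) else st.1),
             (if 128 ≤ PySem.List.pyGetD o i 0 then PySem.List.pySetD st.2 i (PySem.List.pyGetD st.2 i 0 + 1) else st.2)))
          (Z, O)).2.toArray) := by
  induction idxs generalizing Z O with
  | nil => simp
  | cons i rest ih =>
      have h0 : 0 ≤ i := h i (List.mem_cons_self ..)
      have hstep1 :
          (if 128 ≤ z.toArray.getD i.toNat 0 then Z.toArray.setIfInBounds i.toNat (Z.toArray.getD i.toNat 0 + 1) else Z.toArray)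
          = (if 128 ≤ PySem.List.pyGetD z i 0 then PySem.List.pySetD Z i (PySem.List.pyGetD Z i 0 + 1) else Z).toArray := by
        rw [toArray_getD, toArray_getD, PySem.List.pyGetD_of_nonneg z 0 h0,
          PySem.List.pyGetD_of_nonneg Z 0 h0, PySem.List.pySetD_of_nonneg Z _ h0]
        split <;> simp
      have hstep2 :
          (if 128 ≤ o.toArray.getD i.toNat 0 then O.toArray.setIfInBounds i.toNat (O.toArray.getD i.toNat 0 + 1) else O.toArray)
          = (if 128 ≤ PySem.List.pyGetD o i 0 then PySem.List.pySetD O i (PySem.List.pyGetD O i 0 + 1) else O).toArray := by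
        rw [toArray_getD, toArray_getD, PySem.List.pyGetD_of_nonneg o 0 h0,
          PySem.List.pyGetD_of_nonneg O 0 h0, PySem.List.pySetD_of_nonneg O _ h0]
        split <;> simp
      rw [List.foldl_cons, List.foldl_cons, hstep1, hstep2]
      exact ih (fun j hj => h j (List.mem_cons_of_mem _ hj)) _ _

-- B's port with array rows, rewritten back to pyGetD form
theorem alt_eq (zeroes ones : List (List Int)) :
    count_black_pixels_alt zeroes ones
    = ((PySem.List.pyRange 0 784 1).map (fun i =>
          (((zeroes.zip ones).countP (fun p => decide (128 ≤ PySem.List.pyGetD p.1 i 0)) : Nat) : Int)),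
       (PySem.List.pyRange 0 784 1).map (fun i =>
          (((zeroes.zip ones).countP (fun p => decide (128 ≤ PySem.List.pyGetD p.2 i 0)) : Nat) : Int))) := by
  unfold count_black_pixels_alt
  rw [Prod.mk.injEq]
  refine ⟨?_, ?_⟩ <;>
  · apply List.map_congr_left
    intro i hi
    rcases (PySem.List.mem_pyRange_one).1 hi with ⟨h0, h784⟩
    rw [List.countP_map]
    congr 1
    apply List.countP_congr
    intro p hp
    simp only [Function.comp_apply, toArray_getD]
    rw [PySem.List.pyGetD_of_nonneg _ 0 h0]


-- one component of A's inner loop, characterised as a map over the 784 positions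
theorem cbp_fold_one (z : List Int) (n : Nat) (hn : n ≤ 784) (Z : List Int) (hZ : Z.length = 784) :
    (PySem.List.pyRange 0 n 1).foldl
      (fun Z i => if 128 ≤ PySem.List.pyGetD z i 0 then PySem.List.pySetD Z i (PySem.List.pyGetD Z i 0 + 1) else Z) Z
    = (PySem.List.pyRange 0 784 1).map
        (fun i => PySem.List.pyGetD Z i 0 + if i < (n : Int) ∧ 128 ≤ PySem.List.pyGetD z i 0 then 1 else 0) := by
  induction n with
  | zero =>
      rw [PySem.List.pyRange_one_eq_nil (by norm_num)]
      simp only [List.foldl_nil]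
      symm
      have h1 : ∀ i ∈ PySem.List.pyRange 0 784 1,
          (PySem.List.pyGetD Z i 0 + if i < ((0:Nat) : Int) ∧ 128 ≤ PySem.List.pyGetD z i 0 then 1 else 0)
          = PySem.List.pyGetD Z i 0 := by
        intro i hi
        rcases (PySem.List.mem_pyRange_one).1 hi with ⟨h0, _⟩
        rw [if_neg (fun h => absurd h.1 (by omega))]
        ring
      rw [List.map_congr_left h1]
      have h7 : (784 : Int) = (Z.length : Int) := by rw [hZ]; norm_num
      rw [h7]
      exact PySem.List.map_pyGetD_pyRange_zero' Z 0
  | succ m ih =>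
      have hcast : ((m + 1 : Nat) : Int) = (m : Int) + 1 := by push_cast; ring
      rw [hcast, PySem.List.pyRange_one_succ_right (by positivity), List.foldl_append,
        List.foldl_cons, List.foldl_nil, ih (by omega)]
      by_cases hc : 128 ≤ PySem.List.pyGetD z (m : Int) 0
      · rw [if_pos hc,
          PySem.List.pyGetD_map_pyRange_of_nonneg _ 784 (m : Int) 0 (by positivity) (by exact_mod_cast by omega),
          PySem.List.pySetD_natCast]
        apply List.ext_getElem
        · simp [PySem.List.length_pyRange_one]
        · intro k hk1 hk2
          have hk : k < 784 := by
            simpa [PySem.List.length_pyRange_one] using hk2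
          rw [List.getElem_set]
          by_cases hkm : m = k
          · subst hkm
            rw [if_pos rfl]
            simp only [List.getElem_map, PySem.List.getElem_pyRange_one, zero_add]
            rw [if_neg (fun h => absurd h.1 (by omega)), if_pos ⟨by omega, hc⟩]
            ring
          · rw [if_neg hkm]
            simp only [List.getElem_map, PySem.List.getElem_pyRange_one, zero_add]
            by_cases hcz : 128 ≤ PySem.List.pyGetD z (k : Int) 0
            · simp only [hcz, and_true]
              have hne : (k : Int) ≠ (m : Int) := by
                intro h; apply hkm; omega
              split_ifs <;> omega
            · rw [if_neg (fun h => absurd h.2 hcz), if_neg (fun h => absurd h.2 hcz)]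
      · rw [if_neg hc]
        apply List.map_congr_left
        intro i hi
        rcases (PySem.List.mem_pyRange_one).1 hi with ⟨h0, h784⟩
        by_cases hcz : 128 ≤ PySem.List.pyGetD z i 0
        · simp only [hcz, and_true]
          have hne : i ≠ (m : Int) := by
            intro h; rw [h] at hcz; exact hc hcz
          split_ifs <;> omega
        · rw [if_neg (fun h => absurd h.2 hcz), if_neg (fun h => absurd h.2 hcz)]

-- the whole inner loop on a pair state
theorem cbpInner_eq (z o a b : List Int) (ha : a.length = 784) (hb : b.length = 784) :
    cbpInner z o (a, b)
    = ((PySem.List.pyRange 0 784 1).map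
         (fun i => PySem.List.pyGetD a i 0 + if 128 ≤ PySem.List.pyGetD z i 0 then 1 else 0),
       (PySem.List.pyRange 0 784 1).map
         (fun i => PySem.List.pyGetD b i 0 + if 128 ≤ PySem.List.pyGetD o i 0 then 1 else 0)) := by
  unfold cbpInner
  simp only
  have hnn : ∀ i ∈ PySem.List.pyRange 0 784 1, (0:Int) ≤ i := by
    intro i hi; exact ((PySem.List.mem_pyRange_one).1 hi).1
  rw [cbp_fold_commute z o _ hnn a b]
  simp only [List.toList_toArray]
  rw [PySem.List.foldl_prod_mk
      (f := fun Z i => if 128 ≤ PySem.List.pyGetD z i 0 then PySem.List.pySetD Z i (PySem.List.pyGetD Z i 0 + 1) else Z)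
      (g := fun O i => if 128 ≤ PySem.List.pyGetD o i 0 then PySem.List.pySetD O i (PySem.List.pyGetD O i 0 + 1) else O)]
  have h1 := cbp_fold_one z 784 le_rfl a ha
  have h2 := cbp_fold_one o 784 le_rfl b hb
  push_cast at h1 h2
  rw [h1, h2, Prod.mk.injEq]
  refine ⟨?_, ?_⟩ <;>
  · apply List.map_congr_left
    intro i hi
    rcases (PySem.List.mem_pyRange_one).1 hi with ⟨h0, h784⟩
    congr 1
    split_ifs <;> first | rfl | tauto

-- the outer loop over the zipped pairs
theorem cbp_outer (pairs : List (List Int × List Int)) :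
    ∀ (a b : List Int), a.length = 784 → b.length = 784 →
    pairs.foldl (fun st p => cbpInner p.1 p.2 st) (a, b)
    = ((PySem.List.pyRange 0 784 1).map
         (fun i => PySem.List.pyGetD a i 0 + ((pairs.countP (fun p => decide (128 ≤ PySem.List.pyGetD p.1 i 0)) : Nat) : Int)),
       (PySem.List.pyRange 0 784 1).map
         (fun i => PySem.List.pyGetD b i 0 + ((pairs.countP (fun p => decide (128 ≤ PySem.List.pyGetD p.2 i 0)) : Nat) : Int))) := by
  induction pairs with
  | nil =>
      intro a b ha hb
      simp only [List.foldl_nil, List.countP_nil, Nat.cast_zero, add_zero]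
      have h7a : (784 : Int) = (a.length : Int) := by rw [ha]; norm_num
      have h7b : (784 : Int) = (b.length : Int) := by rw [hb]; norm_num
      rw [Prod.mk.injEq]
      refine ⟨?_, ?_⟩
      · rw [h7a]; exact (PySem.List.map_pyGetD_pyRange_zero' a 0).symm
      · rw [h7b]; exact (PySem.List.map_pyGetD_pyRange_zero' b 0).symm
  | cons p ps ih =>
      intro a b ha hb
      rw [List.foldl_cons, cbpInner_eq p.1 p.2 a b ha hb,
        ih _ _ (by simp [PySem.List.length_pyRange_one]) (by simp [PySem.List.length_pyRange_one])]
      rw [Prod.mk.injEq]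
      refine ⟨?_, ?_⟩ <;>
      · apply List.map_congr_left
        intro i hi
        rcases (PySem.List.mem_pyRange_one).1 hi with ⟨h0, h784⟩
        rw [PySem.List.pyGetD_map_pyRange_of_nonneg _ 784 i 0 h0 h784]
        simp only [List.countP_cons, decide_eq_true_eq]
        push_cast
        split_ifs <;> omega

-- ===== VERDICT (by name: the statement is the Claim_ definition above) =====
theorem count_black_pixels_spec : Claim_equal_count_black_pixels := by
  intro zeroes ones _ _
  unfold Spec_count_black_pixels count_black_pixels
  rw [cbp_outer (zeroes.zip ones) _ _ (by simp) (by simp), alt_eq, Prod.mk.injEq]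
  refine ⟨?_, ?_⟩ <;>
  · apply List.map_congr_left
    intro i hi
    rcases (PySem.List.mem_pyRange_one).1 hi with ⟨h0, h784⟩
    rw [PySem.List.pyGetD_eq_getElem (List.replicate 784 0) 0 h0 (by simpa using h784)]
    simp only [List.getElem_replicate, zero_add]
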